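-- pv_equiv track=rewrite | github.com/nick-esqueda/leetcode-practice | 0-STRUCTY/exhaustive_recursion/parenthetical_possibilities.py | parenthetical_possibilities
-- ===== SOURCE A (Python) =====
-- def parenthetical_possibilities(s):
--   """
--   if s is '', return [""]
--   declare res = []
--   go through each char in s
--   if char is not in parens
--     save the first char
--     recurse without that char
--     add that first char to the front of each of the return items
--     append those return items to res
--   if you reach parens
--     loop through each item in paren
--       save each char as 'first'
--       recurse starting after the parens
--       add that first char to the front of each of the return items
--       append those to res
--   return res
--   """
--   if len(s) == 0:
--     return [""]
--
--   res = []
--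
--   if s[0] == "(":
--     chars = ""
--     i = 1
--     while s[i] != ")":
--       chars += s[i]
--       i += 1
--     for c in chars:
--       results = parenthetical_possibilities(s[i + 1:])
--       for j in range(len(results)):
--         results[j] = c + results[j]
--       res += results
--   else:
--     first = s[0]
--     results = parenthetical_possibilities(s[1:])
--     for j in range(len(results)):
--       results[j] = first + results[j]
--     res += results
--
--   return res
-- ===== SOURCE B (Python) =====
-- def parenthetical_possibilities(s):
--     # Parse the string ONCE into a list of option groups, then build the
--     # combinations with a single right-to-left product pass (each suffix
--     # result is computed once and shared, instead of A's per-group-char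
--     # recomputation of the whole suffix recursion).
--     groups = []
--     i = 0
--     n = len(s)
--     while i < n:
--         if s[i] == "(":
--             j = s.index(")", i + 1)
--             opts = s[i + 1:j]
--             groups.append(opts)
--             if not opts:
--                 break  # an empty group means zero combinations
--             i = j + 1
--         else:
--             groups.append(s[i])
--             i += 1
--     res = [""]
--     for opts in reversed(groups):
--         res = [c + r for c in opts for r in res]
--     return res
-- ===== Notes on version B (the rewrite author's own statement) =====
-- stated objective: faster
-- what changed: B parses the string once into a list of option groups and builds the combinations with a single right-to-left product pass sharing each suffix result, instead of A's recursion that re-computes the whole suffix result once per character of every group.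
import Mathlib
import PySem

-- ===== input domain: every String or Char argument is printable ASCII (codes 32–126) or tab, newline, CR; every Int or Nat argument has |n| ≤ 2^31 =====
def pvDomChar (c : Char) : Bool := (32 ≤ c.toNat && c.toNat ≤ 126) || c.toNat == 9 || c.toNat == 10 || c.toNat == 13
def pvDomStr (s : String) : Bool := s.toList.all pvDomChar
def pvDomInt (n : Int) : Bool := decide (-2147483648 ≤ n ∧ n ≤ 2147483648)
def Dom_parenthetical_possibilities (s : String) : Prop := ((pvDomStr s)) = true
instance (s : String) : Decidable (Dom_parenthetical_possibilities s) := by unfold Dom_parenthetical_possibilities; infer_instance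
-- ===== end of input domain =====

-- B parses once into groups and takes one right-to-left product pass sharing each
-- suffix result; A recomputes the suffix recursion once per character of each group.

-- ===== PORT A =====

-- the `while s[i] != ")"` scan: returns (chars, text after the ')'), none = IndexError
def ppScanA : List Char → Option (List Char × List Char)
  | [] => none
  | c :: t => if c = ')' then some ([], t)
      else (ppScanA t).map (fun p => (c :: p.1, p.2))

theorem ppScanA_len : ∀ (l cs r : List Char), ppScanA l = some (cs, r) →
    r.length + cs.length + 1 = l.length := by
  intro l
  induction l with
  | nil => intro cs r h; simp [ppScanA] at h
  | cons c t ih =>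
    intro cs r h
    by_cases hc : c = ')'
    · simp [ppScanA, hc] at h
      simp [← h.1, ← h.2]
    · rw [ppScanA, if_neg hc] at h
      cases hs : ppScanA t with
      | none => rw [hs] at h; simp at h
      | some p =>
        rw [hs] at h
        simp at h
        have := ih p.1 p.2 (by rw [hs])
        have h1 : cs = c :: p.1 := by rw [← h.1]
        have h2 : r = p.2 := h.2.symm
        simp [h1, h2]
        omega

mutual
  -- A's recursion; none = the Python raises (IndexError in the while scan)
  def ppA : List Char → Option (List (List Char))
    | [] => some [[]]
    | c :: t =>
      if c = '(' then
        match hscan : ppScanA t with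
        | none => none
        | some (chars, rest) => ppGroupA chars rest
      else
        match ppA t with
        | none => none
        | some rs => some (rs.map (fun r => c :: r))
  termination_by l => l.length
  decreasing_by
    · have := ppScanA_len t chars rest hscan
      simp only [List.length_cons]; omega
    · simp only [List.length_cons]; omega
  -- A's `for c in chars:` loop — it re-runs the recursion on `rest` for every c
  def ppGroupA : List Char → List Char → Option (List (List Char))
    | [], _ => some []
    | c :: cs, rest =>
      match ppA rest with
      | none => none
      | some rs =>
        match ppGroupA cs rest with
        | none => none
        | some more => some (rs.map (fun r => c :: r) ++ more)
  termination_by cs rest => rest.length + cs.length + 1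
  decreasing_by
    · simp only [List.length_cons]; omega
    · simp only [List.length_cons]; omega
end

def parenthetical_possibilities (s : String) : List String :=
  match ppA s.toList with
  | none => []   -- unreachable under Pre_ (the Python raises here)
  | some rs => rs.map (fun r => String.ofList r)

-- ===== PORT B =====

-- Source B's parse loop: list of option groups; stops after an empty group; none = ValueError from s.index
def ppTokB : List Char → Option (List (List Char))
  | [] => some []
  | c :: t =>
    if c = '(' then
      if ')' ∈ t then
        let j := t.idxOf ')'
        let opts := t.take j
        if opts.isEmpty then some [opts]
        else (ppTokB (t.drop (j + 1))).map (fun gs => opts :: gs)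
      else none
    else (ppTokB t).map (fun gs => [c] :: gs)
termination_by l => l.length
decreasing_by
  · simp only [List.length_drop, List.length_cons]; omega
  · simp only [List.length_cons]; omega

-- Source B's `for opts in reversed(groups): res = [c + r for c in opts for r in res]`
def ppProdB (gs : List (List Char)) : List (List Char) :=
  gs.reverse.foldl (fun res opts => opts.flatMap (fun c => res.map (fun r => c :: r))) [[]]

def parenthetical_possibilities_alt (s : String) : List String :=
  match ppTokB s.toList with
  | none => []   -- unreachable under Pre_ (the Python raises here)
  | some gs => (ppProdB gs).map (fun r => String.ofList r)

-- ===== PRECONDITION & SPEC =====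

-- Pre_ excludes exactly the inputs where A raises IndexError: a '(' reached by the
-- left-to-right scan whose (non-empty) group is never closed by a ')'.
-- One-pass state machine: 0 = outside groups, 1 = just after '(', 2 = inside a
-- non-empty group, 3 = after an empty group "()" (A returns [] ignoring the rest).
def ppPreStep (st : Nat) (c : Char) : Nat :=
  if st = 0 then (if c = '(' then 1 else 0)
  else if st = 1 then (if c = ')' then 3 else 2)
  else if st = 2 then (if c = ')' then 0 else 2)
  else 3

def Pre_parenthetical_possibilities (s : String) : Prop :=
  s.toList.foldl ppPreStep 0 = 0 ∨ s.toList.foldl ppPreStep 0 = 3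
instance (s : String) : Decidable (Pre_parenthetical_possibilities s) := by
  unfold Pre_parenthetical_possibilities; infer_instance

def pvWitness_parenthetical_possibilities : String := "a(bc)(de)f"

def Spec_parenthetical_possibilities (s : String) (out : List String) : Prop := out = parenthetical_possibilities_alt s
instance (s : String) (out : List String) : Decidable (Spec_parenthetical_possibilities s out) := by unfold Spec_parenthetical_possibilities; infer_instance

-- ===== CLAIM (what is proved, stated in full; the proofs are below) =====
def Claim_equal_parenthetical_possibilities : Prop := ∀ (s : String), Dom_parenthetical_possibilities s → Pre_parenthetical_possibilities s → Spec_parenthetical_possibilities s (parenthetical_possibilities s)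

-- ===== LEMMAS AND PROOFS =====

theorem ppScanA_eq (t : List Char) :
    ppScanA t = if ')' ∈ t then
      some (t.take (t.idxOf ')'), t.drop (t.idxOf ')' + 1)) else none := by
  induction t with
  | nil => simp [ppScanA]
  | cons c t ih =>
    by_cases hc : c = ')'
    · simp [ppScanA, hc]
    · have hm : (')' ∈ c :: t) ↔ (')' ∈ t) := by simp [Ne.symm hc]
      by_cases h : ')' ∈ t
      · simp [ppScanA, hc, ih, h, hm]
      · simp [ppScanA, hc, ih, h, hm]

theorem ppProdB_cons (x : List Char) (gs : List (List Char)) :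
    ppProdB (x :: gs) = x.flatMap (fun c => (ppProdB gs).map (fun r => c :: r)) := by
  simp [ppProdB, List.foldl_append]

theorem ppGroupA_eq (chars rest : List Char) :
    ppGroupA chars rest =
      if chars.isEmpty then some []
      else (ppA rest).map (fun R => chars.flatMap (fun c => R.map (fun r => c :: r))) := by
  induction chars with
  | nil => simp [ppGroupA]
  | cons c cs ih =>
    rw [ppGroupA, if_neg (show ¬((c :: cs).isEmpty = true) by simp), ih]
    cases hA : ppA rest with
    | none => simp
    | some rs =>
      by_cases hcs : cs.isEmpty
      · have hc0 : cs = [] := List.isEmpty_iff.mp hcs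
        subst hc0; simp
      · simp [hcs]

theorem ppA_eq_tok : ∀ (l : List Char), ppA l = (ppTokB l).map ppProdB := by
  intro l
  induction hn : l.length using Nat.strong_induction_on generalizing l with
  | _ n IH =>
  match l with
  | [] => simp [ppA, ppTokB, ppProdB]
  | c :: t =>
    by_cases hc : c = '('
    · subst hc
      rw [ppA, ppTokB]
      cases hs : ppScanA t with
      | none =>
        have hmem : ')' ∉ t := by
          intro hm
          rw [ppScanA_eq, if_pos hm] at hs
          simp at hs
        simp [hmem]
      | some p =>
        obtain ⟨chars, rest⟩ := p
        have hmem : ')' ∈ t := by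
          by_contra hm
          rw [ppScanA_eq, if_neg hm] at hs
          simp at hs
        have hvals : chars = t.take (t.idxOf ')') ∧ rest = t.drop (t.idxOf ')' + 1) := by
          rw [ppScanA_eq, if_pos hmem] at hs
          have := Option.some.inj hs
          exact ⟨(congrArg Prod.fst this).symm, (congrArg Prod.snd this).symm⟩
        simp only [if_pos hmem, ← hvals.1, ← hvals.2]
        rw [ppGroupA_eq]
        by_cases he : chars.isEmpty
        · simp [ppProdB, List.isEmpty_iff.mp he]
        · have h1 : rest.length ≤ t.length := by
            rw [hvals.2, List.length_drop]; omega
          have hlt : rest.length < n := by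
            simp only [List.length_cons] at hn; omega
          have hne : chars ≠ [] := fun h0 => he (by simp [h0])
          rw [IH rest.length hlt rest rfl, if_neg he]
          cases hT : ppTokB rest with
          | none => simp [hne]
          | some gs => simp [hne, ppProdB_cons]
    · rw [ppA, ppTokB]
      have hlt : t.length < n := by
        simp only [List.length_cons] at hn; omega
      rw [IH t.length hlt t rfl]
      simp only [if_neg hc]
      cases hT : ppTokB t with
      | none => simp
      | some gs => simp [ppProdB_cons]

-- ===== VERDICT (by name: the statement is the Claim_ definition above) =====
theorem parenthetical_possibilities_spec : Claim_equal_parenthetical_possibilities := by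
  intro s _ _
  unfold Spec_parenthetical_possibilities parenthetical_possibilities parenthetical_possibilities_alt
  rw [ppA_eq_tok]
  cases h : ppTokB s.toList <;> simp
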